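-- pv_equiv track=rewrite | github.com/marcosgabrielms/GRADUACAO-ADS-IFPI | Algoritmos/Beecrowd/Bee #03 - Iterações e Coleções/bee1287.py | obter_numero_processado
-- ===== SOURCE A (Python) =====
-- def obter_numero_processado(texto_original: str) -> str:
--     digitos_filtrados = []
--
--     for caractere in texto_original:
--         if caractere == ',' or caractere == ' ':
--             continue
--         elif caractere == 'O' or caractere == 'o':
--             digitos_filtrados.append('0')
--         elif caractere == 'l':
--             digitos_filtrados.append('1')
--         elif '0' <= caractere <= '9':
--             digitos_filtrados.append(caractere)
--         else:
--             return ""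
--
--     return "".join(digitos_filtrados)
-- ===== SOURCE B (Python) =====
-- _ALLOWED = ", Ool0123456789"
--
-- def obter_numero_processado(texto_original: str) -> str:
--     # validate the whole string at once via set containment
--     if not set(texto_original) <= set(_ALLOWED):
--         return ""
--     # then rewrite it with global string replacements
--     return (texto_original
--             .replace(",", "")
--             .replace(" ", "")
--             .replace("O", "0")
--             .replace("o", "0")
--             .replace("l", "1"))
-- ===== Notes on version B (the rewrite author's own statement) =====
-- stated objective: alternative
-- what changed: Replaces A's single per-character loop with inline early return by whole-string operations: a set-containment test (set(texto) <= allowed set) decides validity in one step, then five global str.replace passes rewrite the string; no per-character branching loop remains.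
import Mathlib
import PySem

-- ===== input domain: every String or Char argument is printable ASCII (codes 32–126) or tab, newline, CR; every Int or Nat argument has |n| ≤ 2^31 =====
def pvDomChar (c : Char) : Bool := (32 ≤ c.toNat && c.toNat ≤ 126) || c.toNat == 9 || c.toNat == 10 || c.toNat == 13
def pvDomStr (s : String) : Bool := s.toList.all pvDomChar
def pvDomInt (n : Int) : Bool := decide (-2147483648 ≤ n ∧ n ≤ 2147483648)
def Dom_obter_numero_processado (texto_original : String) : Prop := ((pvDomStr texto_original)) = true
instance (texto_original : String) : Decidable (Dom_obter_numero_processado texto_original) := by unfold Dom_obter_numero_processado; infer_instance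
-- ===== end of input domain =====

-- B replaces A's per-character branching loop with early return by whole-string operations:
-- one set-containment validity test, then five global string replacements (alternative; same cost).

-- ===== PORT A =====
-- A's loop with the growing list `digitos_filtrados` as accumulator; the `return ""` branch ends the recursion.
def pvLoopA : List Char → List Char → String
  | [], acc => String.ofList acc
  | c :: rest, acc =>
    if c = ',' ∨ c = ' ' then pvLoopA rest acc
    else if c = 'O' ∨ c = 'o' then pvLoopA rest (acc ++ ['0'])
    else if c = 'l' then pvLoopA rest (acc ++ ['1'])
    else if '0' ≤ c ∧ c ≤ '9' then pvLoopA rest (acc ++ [c])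
    else ""

def obter_numero_processado (texto_original : String) : String :=
  pvLoopA texto_original.toList []

-- ===== PORT B =====
def pvAllowed : String := ", Ool0123456789"

def obter_numero_processado_alt (texto_original : String) : String :=
  -- if not set(texto_original) <= set(_ALLOWED): return ""
  if !(PySem.Set.issubset (PySem.Set.ofList texto_original.toList)
        (PySem.Set.ofList pvAllowed.toList)) then ""
  else
    -- chained global replaces
    PySem.Str.replace (PySem.Str.replace (PySem.Str.replace (PySem.Str.replace
      (PySem.Str.replace texto_original "," "") " " "") "O" "0") "o" "0") "l" "1"

-- ===== PRECONDITION & SPEC =====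
def Spec_obter_numero_processado (texto_original : String) (out : String) : Prop := out = obter_numero_processado_alt texto_original
instance (texto_original : String) (out : String) : Decidable (Spec_obter_numero_processado texto_original out) := by unfold Spec_obter_numero_processado; infer_instance

-- ===== CLAIM (what is proved, stated in full; the proofs are below) =====
def Claim_equal_obter_numero_processado : Prop := ∀ (texto_original : String), Dom_obter_numero_processado texto_original → Spec_obter_numero_processado texto_original (obter_numero_processado texto_original)

-- ===== LEMMAS AND PROOFS =====

-- per-character translation A performs (proof-side characterisation)
def pvTr (c : Char) : Option Char :=
  if c = ',' ∨ c = ' ' then none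
  else if c = 'O' ∨ c = 'o' then some '0'
  else if c = 'l' then some '1'
  else some c

-- "c is one of the characters A accepts"
def pvAok (c : Char) : Bool :=
  decide (c = ',' ∨ c = ' ' ∨ c = 'O' ∨ c = 'o' ∨ c = 'l' ∨ ('0' ≤ c ∧ c ≤ '9'))

theorem pvLoopA_eq (cs : List Char) : ∀ acc : List Char,
    pvLoopA cs acc =
      if cs.all pvAok then String.ofList (acc ++ cs.filterMap pvTr) else "" := by
  induction cs with
  | nil => intro acc; simp [pvLoopA]
  | cons c rest ih =>
    intro acc
    by_cases h1 : c = ',' ∨ c = ' '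
    · rcases h1 with h1 | h1 <;> subst h1 <;>
        simp [pvLoopA, pvTr, pvAok, ih]
    · by_cases h2 : c = 'O' ∨ c = 'o'
      · rcases h2 with h2 | h2 <;> subst h2 <;>
          simp [pvLoopA, pvTr, pvAok, ih, List.all_cons]
      · by_cases h3 : c = 'l'
        · subst h3; simp [pvLoopA, pvTr, pvAok, ih, List.all_cons]
        · by_cases h4 : '0' ≤ c ∧ c ≤ '9'
          · have hok : pvAok c = true := by
              simp [pvAok]; tauto
            simp [pvLoopA, pvTr, h1, h2, h3, h4, ih, List.all_cons, hok]
          · have hok : pvAok c = false := by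
              simp [pvAok, h3]
              refine ⟨fun h => h1 (Or.inl h), fun h => h1 (Or.inr h),
                fun h => h2 (Or.inl h), fun h => h2 (Or.inr h), fun hle => ?_⟩
              by_contra hnot
              exact h4 ⟨hle, le_of_not_gt hnot⟩
            simp [pvLoopA, h1, h2, h3, h4, List.all_cons, hok]

theorem pvChar_of_toNat (c k : Char) (h : c.toNat = k.toNat) : c = k :=
  Char.ext (UInt32.toNat_inj.mp h)

theorem pvAllowed_toList :
    pvAllowed.toList = [',',' ','O','o','l','0','1','2','3','4','5','6','7','8','9'] := by
  decide

theorem pvAok_iff_mem (c : Char) : pvAok c = true ↔ c ∈ pvAllowed.toList := by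
  rw [pvAllowed_toList]
  constructor
  · intro h
    simp [pvAok] at h
    rcases h with rfl | rfl | rfl | rfl | rfl | ⟨h0, h9⟩
    · decide
    · decide
    · decide
    · decide
    · decide
    · have hl : 48 ≤ c.toNat := by
        simpa [Char.le_def, UInt32.le_iff_toNat_le] using h0
      have hr : c.toNat ≤ 57 := by
        simpa [Char.le_def, UInt32.le_iff_toNat_le] using h9
      set n := c.toNat with hn
      interval_cases n <;>
        [ (have := pvChar_of_toNat c '0' hn.symm);
          (have := pvChar_of_toNat c '1' hn.symm);
          (have := pvChar_of_toNat c '2' hn.symm);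
          (have := pvChar_of_toNat c '3' hn.symm);
          (have := pvChar_of_toNat c '4' hn.symm);
          (have := pvChar_of_toNat c '5' hn.symm);
          (have := pvChar_of_toNat c '6' hn.symm);
          (have := pvChar_of_toNat c '7' hn.symm);
          (have := pvChar_of_toNat c '8' hn.symm);
          (have := pvChar_of_toNat c '9' hn.symm) ] <;>
        subst this <;> decide
  · intro h
    simp at h
    rcases h with rfl | rfl | rfl | rfl | rfl | rfl | rfl | rfl | rfl | rfl | rfl | rfl | rfl | rfl | rfl <;> decide

-- B's guard computes exactly "every character of the input is allowed"
theorem pvGuard_eq (cs : List Char) :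
    PySem.Set.issubset (PySem.Set.ofList cs) (PySem.Set.ofList pvAllowed.toList)
      = cs.all pvAok := by
  rcases hb : cs.all pvAok with _ | _
  · simp at hb
    obtain ⟨c, hc, hok⟩ := hb
    simp [PySem.Set.issubset, PySem.Set.contains]
    exact ⟨c, hc, fun hm => by simp [(pvAok_iff_mem c).mpr hm] at hok⟩
  · simp at hb
    simp [PySem.Set.issubset, PySem.Set.contains]
    exact fun c hc => (pvAok_iff_mem c).mp (hb c hc)

theorem pvGo_single (a : Char) (new : List Char) :
    ∀ (s acc : List Char) (fuel : Nat), s.length ≤ fuel →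
      PySem.Chars.replace.go [a] new fuel s acc
        = acc.reverse ++ s.flatMap (fun c => if c = a then new else [c]) := by
  intro s
  induction s with
  | nil =>
    intro acc fuel _
    cases fuel <;> simp [PySem.Chars.replace.go]
  | cons c t ih =>
    intro acc fuel hf
    cases fuel with
    | zero => simp at hf
    | succ m =>
      by_cases h : c = a
      · subst h
        have hp : List.isPrefixOf [c] (c :: t) = true := by simp [List.isPrefixOf]
        simp [PySem.Chars.replace.go, hp, ih (new.reverse ++ acc) m (by simpa using hf)]
      · have hp : List.isPrefixOf [a] (c :: t) = false := by
          simp [List.isPrefixOf]; exact fun he => h he.symm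
        simp [PySem.Chars.replace.go, hp, ih (c :: acc) m (by simpa using hf), h]

theorem pvReplace_single (s : List Char) (a : Char) (new : List Char) :
    PySem.Chars.replace s [a] new = s.flatMap (fun c => if c = a then new else [c]) := by
  simp [PySem.Chars.replace, pvGo_single a new s [] s.length le_rfl]

theorem pvFilterMap_eq_flatMap (l : List Char) (f : Char → Option Char) :
    l.filterMap f = l.flatMap (fun c => (f c).toList) := by
  induction l with
  | nil => rfl
  | cons c t ih => cases h : f c <;> simp [h, ih]

theorem pvChain_eq (cs : List Char) (h : cs.all pvAok = true) :
    (((((cs.flatMap (fun c => if c = ',' then [] else [c])).flatMap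
        (fun c => if c = ' ' then [] else [c])).flatMap
        (fun c => if c = 'O' then ['0'] else [c])).flatMap
        (fun c => if c = 'o' then ['0'] else [c])).flatMap
        (fun c => if c = 'l' then ['1'] else [c]))
      = cs.filterMap pvTr := by
  rw [List.flatMap_assoc, List.flatMap_assoc, List.flatMap_assoc, List.flatMap_assoc,
      pvFilterMap_eq_flatMap]
  apply List.flatMap_congr
  intro c hc
  have hok : c ∈ pvAllowed.toList := by
    rw [← pvAok_iff_mem]
    exact (List.all_eq_true.mp h) c hc
  rw [pvAllowed_toList] at hok
  simp at hok
  rcases hok with rfl | rfl | rfl | rfl | rfl | rfl | rfl | rfl | rfl | rfl | rfl | rfl | rfl | rfl | rfl <;> decide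

-- ===== VERDICT (by name: the statement is the Claim_ definition above) =====
theorem obter_numero_processado_spec : Claim_equal_obter_numero_processado := by
  intro s _
  unfold Spec_obter_numero_processado obter_numero_processado obter_numero_processado_alt
  rw [pvGuard_eq, pvLoopA_eq]
  rcases h : s.toList.all pvAok with _ | _
  · simp
  · simp [PySem.Str.replace, pvReplace_single]
    rw [pvChain_eq s.toList h]
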